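-- pv_equiv track=rewrite | github.com/akaimar/python | praktika/anagram.py | leidub_anagramm
-- ===== SOURCE A (Python) =====
-- def leidub_anagramm(sisend):
--     for i in range(len(sisend)):
--         for j in range(len(sisend[i])):
--             if j == 0:
--                 esimene = ""
--             else:
--                 esimene = sisend[i][j-1]
--             if j == len(sisend[i])-1:
--                 viimane = ""
--             else:
--                 viimane = sisend[i][j+1]
--             if sorted(sisend[i][j]) == sorted(esimene+viimane):
--                 return True
--     return False
-- ===== SOURCE B (Python) =====
-- def _merge(a, b):
--     out = []
--     i = k = 0
--     while i < len(a) and k < len(b):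
--         if a[i] <= b[k]:
--             out.append(a[i]); i += 1
--         else:
--             out.append(b[k]); k += 1
--     out.extend(a[i:])
--     out.extend(b[k:])
--     return out
--
-- def leidub_anagramm(sisend):
--     for row in sisend:
--         n = len(row)
--         keys = [sorted(w) for w in row]
--         for j in range(n):
--             left = keys[j - 1] if j > 0 else []
--             right = keys[j + 1] if j < n - 1 else []
--             if keys[j] == _merge(left, right):
--                 return True
--     return False
-- ===== Notes on version B (the rewrite author's own statement) =====
-- stated objective: alternative
-- what changed: B sorts every word once per row into a key list and tests each word's key against a two-pointer merge of its neighbours' keys, instead of A's re-sorting of each word and of every neighbour concatenation at every position.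
import Mathlib
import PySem

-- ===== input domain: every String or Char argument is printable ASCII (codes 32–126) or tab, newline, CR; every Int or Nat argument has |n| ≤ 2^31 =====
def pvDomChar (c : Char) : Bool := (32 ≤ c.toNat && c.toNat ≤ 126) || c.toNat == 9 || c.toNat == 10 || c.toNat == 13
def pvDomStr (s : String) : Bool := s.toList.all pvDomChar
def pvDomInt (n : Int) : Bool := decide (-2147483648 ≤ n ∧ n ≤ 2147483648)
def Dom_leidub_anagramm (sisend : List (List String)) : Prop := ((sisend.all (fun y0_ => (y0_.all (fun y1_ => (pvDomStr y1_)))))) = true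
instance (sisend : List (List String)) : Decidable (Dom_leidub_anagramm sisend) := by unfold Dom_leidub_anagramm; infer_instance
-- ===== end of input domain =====

-- B replaces A's per-position re-sorting of neighbour concatenations by one sorted key per word
-- plus a two-pointer merge of the neighbour keys (alternative algorithm, same result).
-- ===== PORT A =====
def pvRowA (row : List String) : Bool :=
  (List.range row.length).any (fun j =>
    let esimene : String := if j = 0 then "" else row.getD (j - 1) ""
    let viimane : String := if j = row.length - 1 then "" else row.getD (j + 1) ""
    PySem.List.sorted (row.getD j "").toList (fun x => x) ==
      PySem.List.sorted (esimene ++ viimane).toList (fun x => x))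

def leidub_anagramm (sisend : List (List String)) : Bool :=
  sisend.any pvRowA

-- ===== PORT B =====
def pvMerge : List Char → List Char → List Char
  | [], b => b
  | a, [] => a
  | x :: xs, y :: ys =>
      if x ≤ y then x :: pvMerge xs (y :: ys) else y :: pvMerge (x :: xs) ys
termination_by a b => a.length + b.length

def pvRowB (row : List String) : Bool :=
  let keys := row.map (fun w => PySem.List.sorted w.toList (fun x => x))
  (List.range row.length).any (fun j =>
    let left := if 0 < j then keys.getD (j - 1) [] else []
    let right := if j < row.length - 1 then keys.getD (j + 1) [] else []
    keys.getD j [] == pvMerge left right)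

def leidub_anagramm_alt (sisend : List (List String)) : Bool :=
  sisend.any pvRowB

-- ===== PRECONDITION & SPEC =====
def Spec_leidub_anagramm (sisend : List (List String)) (out : Bool) : Prop := out = leidub_anagramm_alt sisend
instance (sisend : List (List String)) (out : Bool) : Decidable (Spec_leidub_anagramm sisend out) := by unfold Spec_leidub_anagramm; infer_instance

-- ===== CLAIM (what is proved, stated in full; the proofs are below) =====
def Claim_equal_leidub_anagramm : Prop := ∀ (sisend : List (List String)), Dom_leidub_anagramm sisend → Spec_leidub_anagramm sisend (leidub_anagramm sisend)

-- ===== LEMMAS AND PROOFS =====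
theorem pvMerge_perm (a b : List Char) : (pvMerge a b).Perm (a ++ b) := by
  induction a, b using pvMerge.induct with
  | case1 b => simp [pvMerge]
  | case2 a h => cases a <;> simp [pvMerge]
  | case3 x xs y ys hle ih =>
      simpa [pvMerge, hle] using ih.cons x
  | case4 x xs y ys hle ih =>
      simp only [pvMerge, if_neg hle]
      exact (ih.cons y).trans (List.perm_middle).symm

theorem pvMerge_pairwise (a b : List Char)
    (ha : a.Pairwise (· ≤ ·)) (hb : b.Pairwise (· ≤ ·)) :
    (pvMerge a b).Pairwise (· ≤ ·) := by
  induction a, b using pvMerge.induct with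
  | case1 b => simp [pvMerge]; exact hb
  | case2 a h => cases a <;> simpa [pvMerge] using ha
  | case3 x xs y ys hle ih =>
      simp only [pvMerge, if_pos hle]
      rw [List.pairwise_cons] at ha ⊢
      refine ⟨?_, ih ha.2 hb⟩
      intro z hz
      rcases List.mem_append.mp ((pvMerge_perm xs (y :: ys)).mem_iff.mp hz) with h | h
      · exact ha.1 z (by simpa using h)
      · rcases List.mem_cons.mp (by simpa using h) with rfl | h
        · exact hle
        · rw [List.pairwise_cons] at hb
          exact le_trans hle (hb.1 z h)
  | case4 x xs y ys hle ih =>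
      simp only [pvMerge, if_neg hle]
      rw [List.pairwise_cons] at hb ⊢
      refine ⟨?_, ih ha hb.2⟩
      have hyx : y ≤ x := le_of_not_ge hle
      intro z hz
      rcases List.mem_append.mp ((pvMerge_perm (x :: xs) ys).mem_iff.mp hz) with h | h
      · rcases List.mem_cons.mp h with rfl | h
        · exact hyx
        · rw [List.pairwise_cons] at ha
          exact le_trans hyx (ha.1 z h)
      · exact hb.1 z h

theorem pvMerge_sorted (a b : List Char) :
    PySem.List.sorted (a ++ b) (fun x => x) =
      pvMerge (PySem.List.sorted a (fun x => x)) (PySem.List.sorted b (fun x => x)) := by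
  refine PySem.List.eq_of_perm_of_pairwise_le_of_injective (fun x => x)
    (fun _ _ h => h) ?_ ?_ ?_
  · refine (PySem.List.sorted_perm ..).trans ?_
    refine ((pvMerge_perm ..).trans ?_).symm
    exact ((PySem.List.sorted_perm ..).append (PySem.List.sorted_perm ..))
  · exact PySem.List.sorted_pairwise ..
  · exact pvMerge_pairwise _ _ (PySem.List.sorted_pairwise ..) (PySem.List.sorted_pairwise ..)

theorem pvAny_congr {α : Type} (l : List α) (f g : α → Bool)
    (h : ∀ x ∈ l, f x = g x) : l.any f = l.any g := by
  induction l with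
  | nil => rfl
  | cons a t ih =>
      simp only [List.any_cons, h a (List.mem_cons_self), 
        ih (fun x hx => h x (List.mem_cons_of_mem _ hx))]

theorem pvRow_eq (row : List String) : pvRowA row = pvRowB row := by
  unfold pvRowA pvRowB
  refine pvAny_congr _ _ _ ?_
  intro j hj
  rw [List.mem_range] at hj
  have hkey : ∀ k : Nat, k < row.length →
      (row.map (fun w => PySem.List.sorted w.toList (fun x => x))).getD k [] =
        PySem.List.sorted (row.getD k "").toList (fun x => x) := by
    intro k hk
    simp [List.getD_eq_getElem?_getD, List.getElem?_map, List.getElem?_eq_getElem hk]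
  dsimp only
  congr 1
  · exact (hkey j hj).symm
  · rw [String.toList_append, pvMerge_sorted]
    congr 1
    · by_cases h0 : j = 0
      · simp [h0, PySem.List.sorted_eq_nil_iff]
      · have : 0 < j := Nat.pos_of_ne_zero h0
        rw [if_neg h0, if_pos this, hkey (j-1) (by omega)]
    · by_cases hl : j = row.length - 1
      · rw [if_pos hl, if_neg (by omega)]
        simp [PySem.List.sorted_eq_nil_iff]
      · rw [if_neg hl, if_pos (by omega), hkey (j+1) (by omega)]

-- ===== VERDICT (by name: the statement is the Claim_ definition above) =====
theorem leidub_anagramm_spec : Claim_equal_leidub_anagramm := by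
  intro sisend _
  unfold Spec_leidub_anagramm leidub_anagramm leidub_anagramm_alt
  exact congrArg sisend.any (funext pvRow_eq)
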